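-- pv_equiv track=rewrite | github.com/guvengergerli/InteractiveFOL | backend/CNFResolver/clauseTypes.py | tokenizeClause
-- ===== SOURCE A (Python) =====
-- from typing import Union,List,Literal,Tuple,Any
--
-- def tokenizeClause(clause: str) -> List[str]:
--     tokens = ["or", "not", "(", ")", ","]
--     tokenized = []
--     i = 0
--     while i < len(clause):
--         if clause[i] in tokens:
--             tokenized.append(clause[i])
--             i += 1
--         else:
--             start = i
--             while i < len(clause) and clause[i] not in tokens:
--                 i += 1
--             tokenized.append(clause[start:i])
--     return tokenized
-- ===== SOURCE B (Python) =====
-- def tokenizeClause(clause: str):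
--     tokenized = []
--     cur = ""
--     for ch in clause:
--         if ch in "(),":
--             if cur:
--                 tokenized.append(cur)
--                 cur = ""
--             tokenized.append(ch)
--         else:
--             cur += ch
--     if cur:
--         tokenized.append(cur)
--     return tokenized
-- ===== Notes on version B (the rewrite author's own statement) =====
-- stated objective: simpler
-- what changed: Replaces A's index-based outer while-loop with a nested delimiter-scanning inner while-loop and slicing by a single flat for-loop over the characters that keeps the current run in an accumulator and flushes it at each single-character delimiter; the multi-character entries of A's token list can never match a one-character membership test, so only the three punctuation characters delimit.
import Mathlib
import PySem

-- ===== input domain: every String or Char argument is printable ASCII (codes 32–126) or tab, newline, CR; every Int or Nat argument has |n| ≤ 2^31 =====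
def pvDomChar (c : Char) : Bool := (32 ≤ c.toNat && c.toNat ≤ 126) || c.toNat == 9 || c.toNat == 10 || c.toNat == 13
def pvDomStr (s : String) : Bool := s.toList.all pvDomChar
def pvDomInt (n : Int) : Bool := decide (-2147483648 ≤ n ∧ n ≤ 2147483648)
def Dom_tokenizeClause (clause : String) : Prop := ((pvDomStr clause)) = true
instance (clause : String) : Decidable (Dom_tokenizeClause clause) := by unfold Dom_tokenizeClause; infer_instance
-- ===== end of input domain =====

-- B replaces A's outer while + inner delimiter-scanning while + slice by one flat pass
-- over the characters with a current-run accumulator flushed at each delimiter (simpler).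

-- ===== PORT A =====
-- A's token list; a single character is 'in tokens' iff it is "(", ")" or ",".
def tokATokens : List String := ["or", "not", "(", ")", ","]

-- inner while of A: consume chars while 'clause[i] not in tokens'; returns (the run
-- clause[start:i], the remaining chars).
def tokAInner : List Char → List Char × List Char
  | [] => ([], [])
  | c :: rest =>
    if tokATokens.contains (String.ofList [c]) then ([], c :: rest)
    else
      let p := tokAInner rest
      (c :: p.1, p.2)

theorem tokAInner_snd_le (l : List Char) : (tokAInner l).2.length ≤ l.length := by
  induction l with
  | nil => simp [tokAInner]
  | cons c rest ih =>
    simp only [tokAInner]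
    split
    · simp
    · simpa using Nat.le_succ_of_le ih

-- outer while of A, on the remaining characters.
def tokALoop (l : List Char) : List String :=
  match l with
  | [] => []
  | c :: rest =>
    if tokATokens.contains (String.ofList [c]) then
      String.ofList [c] :: tokALoop rest
    else
      let p := tokAInner (c :: rest)
      String.ofList p.1 :: tokALoop p.2
termination_by l.length
decreasing_by
  · simp
  · simp only [tokAInner]
    split
    · simp_all
    · simpa using Nat.lt_succ_of_le (tokAInner_snd_le rest)

def tokenizeClause (clause : String) : List String := tokALoop clause.toList

-- ===== PORT B =====
def tokBDelim (c : Char) : Bool := c == '(' || c == ')' || c == ','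

-- one step of B's for-loop: state = (tokens so far, current run).
def tokBStep (st : List String × List Char) (c : Char) : List String × List Char :=
  if tokBDelim c then
    ((if st.2.isEmpty then st.1 else st.1 ++ [String.ofList st.2]) ++ [String.ofList [c]], [])
  else
    (st.1, st.2 ++ [c])

def tokenizeClause_alt (clause : String) : List String :=
  let st := clause.toList.foldl tokBStep ([], [])
  if st.2.isEmpty then st.1 else st.1 ++ [String.ofList st.2]

-- ===== PRECONDITION & SPEC =====
def Spec_tokenizeClause (clause : String) (out : List String) : Prop := out = tokenizeClause_alt clause
instance (clause : String) (out : List String) : Decidable (Spec_tokenizeClause clause out) := by unfold Spec_tokenizeClause; infer_instance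

-- ===== CLAIM (what is proved, stated in full; the proofs are below) =====
def Claim_equal_tokenizeClause : Prop := ∀ (clause : String), Dom_tokenizeClause clause → Spec_tokenizeClause clause (tokenizeClause clause)

-- ===== LEMMAS AND PROOFS =====

theorem ofList_eq_iff (l : List Char) (s : String) : (String.ofList l = s) ↔ l = s.toList := by
  constructor
  · intro h; rw [← h, String.toList_ofList]
  · intro h; rw [h, String.ofList_toList]

-- A's membership test on a single character agrees with B's delimiter test.
theorem tokA_mem_iff (c : Char) : (String.ofList [c] ∈ tokATokens) ↔ tokBDelim c = true := by
  unfold tokATokens tokBDelim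
  by_cases h1 : c = '(' <;> by_cases h2 : c = ')' <;> by_cases h3 : c = ','
  all_goals simp [h1, h2, h3, ofList_eq_iff, List.ext_get_iff]

theorem tokALoop_nil : tokALoop [] = [] := by rw [tokALoop]

theorem tokALoop_cons (c : Char) (rest : List Char) :
    tokALoop (c :: rest) =
      if tokBDelim c then String.ofList [c] :: tokALoop rest
      else String.ofList (tokAInner (c :: rest)).1 :: tokALoop (tokAInner (c :: rest)).2 := by
  rw [tokALoop]
  simp only [List.contains_eq_mem]
  by_cases h : tokBDelim c = true
  · simp [tokA_mem_iff, h]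
  · simp [tokA_mem_iff, h]

-- mid-run, A's inner while prepends the pending run.
theorem tokAInner_append (cur l : List Char) (h : ∀ c ∈ cur, tokBDelim c = false) :
    tokAInner (cur ++ l) = (cur ++ (tokAInner l).1, (tokAInner l).2) := by
  induction cur with
  | nil => simp
  | cons c cur ih =>
    have hc : tokBDelim c = false := h c (List.mem_cons_self ..)
    simp only [List.cons_append, tokAInner, List.contains_eq_mem, decide_eq_true_eq,
      tokA_mem_iff, hc, Bool.false_eq_true, if_false,
      ih (fun d hd => h d (List.mem_cons_of_mem _ hd))]

-- main invariant of B's fold: running B from state (acc, cur) — cur a pending run of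
-- non-delimiters — yields acc followed by A's tokens for cur ++ l.
theorem tokB_invariant (l : List Char) (acc : List String) (cur : List Char)
    (h : ∀ c ∈ cur, tokBDelim c = false) :
    (if (l.foldl tokBStep (acc, cur)).2.isEmpty then (l.foldl tokBStep (acc, cur)).1
     else (l.foldl tokBStep (acc, cur)).1 ++ [String.ofList (l.foldl tokBStep (acc, cur)).2])
      = acc ++ tokALoop (cur ++ l) := by
  induction l generalizing acc cur with
  | nil =>
    simp only [List.foldl_nil, List.append_nil]
    cases cur with
    | nil => simp [tokALoop_nil]
    | cons c rest =>
      have hinner : tokAInner (c :: rest) = (c :: rest, []) := by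
        simpa [tokAInner] using tokAInner_append (c :: rest) [] h
      have hc : tokBDelim c = false := h c (List.mem_cons_self ..)
      simp [tokALoop_cons, hc, hinner, tokALoop_nil]
  | cons c l ih =>
    by_cases hc : tokBDelim c = true
    · rcases cur with _ | ⟨d, rest⟩
      · have hstep : tokBStep (acc, ([] : List Char)) c = (acc ++ [String.ofList [c]], []) := by
          simp [tokBStep, hc]
        simp only [List.foldl_cons, hstep]
        rw [ih (acc ++ [String.ofList [c]]) [] (by simp)]
        simp [tokALoop_cons, hc]
      · have hd : ∀ e ∈ d :: rest, tokBDelim e = false := h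
        have hstep : tokBStep (acc, d :: rest) c =
            (acc ++ [String.ofList (d :: rest)] ++ [String.ofList [c]], []) := by
          simp [tokBStep, hc]
        have hinner : tokAInner ((d :: rest) ++ c :: l) = (d :: rest, c :: l) := by
          simpa [tokAInner, tokA_mem_iff, hc] using tokAInner_append (d :: rest) (c :: l) hd
        simp only [List.foldl_cons, hstep]
        rw [ih (acc ++ [String.ofList (d :: rest)] ++ [String.ofList [c]]) [] (by simp)]
        rw [List.cons_append, tokALoop_cons d, if_neg (by simp [hd d (List.mem_cons_self ..)])]
        rw [← List.cons_append, hinner]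
        simp [tokALoop_cons, hc]
    · have hc' : tokBDelim c = false := by simpa using hc
      have hstep : tokBStep (acc, cur) c = (acc, cur ++ [c]) := by simp [tokBStep, hc']
      simp only [List.foldl_cons, hstep]
      rw [ih acc (cur ++ [c]) (by
        intro d hd
        rcases List.mem_append.mp hd with hd | hd
        · exact h d hd
        · simpa [List.mem_singleton.mp hd] using hc')]
      simp

-- ===== VERDICT (by name: the statement is the Claim_ definition above) =====
theorem tokenizeClause_spec : Claim_equal_tokenizeClause := by
  intro clause _
  unfold Spec_tokenizeClause tokenizeClause tokenizeClause_alt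
  simpa using (tokB_invariant clause.toList [] [] (by simp)).symm
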